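-- pv_equiv track=rewrite | github.com/lucaspastorduran/6.00.1x | final_exam/Problem4.py | largest_odd_times
-- ===== SOURCE A (Python) =====
-- from collections import Counter
--
-- def largest_odd_times(L):
--     """ Assumes L is a non-empty list of ints
--         Returns the largest element of L that occurs an odd number
--         of times in L. If no such element exists, returns None """
--     # Count times ach element appears
--     elements_frequency = dict(Counter(L))
--     # Get the maximum of elements that only appear Odd times
--     maximum = None
--     for k, v in elements_frequency.items():
--         if v%2 != 0:
--             # element appears odd times
--             if maximum is None or k > maximum:
--                 maximum = k
--     return maximum
-- ===== SOURCE B (Python) =====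
-- def largest_odd_times(L):
--     """ Assumes L is a non-empty list of ints
--         Returns the largest element of L that occurs an odd number
--         of times in L. If no such element exists, returns None """
--     # Single pass with a parity set: toggle membership on each occurrence,
--     # so at the end `odd` holds exactly the elements with an odd count.
--     odd = set()
--     for x in L:
--         if x in odd:
--             odd.remove(x)
--         else:
--             odd.add(x)
--     return max(odd) if odd else None
-- ===== Notes on version B (the rewrite author's own statement) =====
-- stated objective: simpler
-- what changed: Replaces the Counter frequency dict plus a max-scan over its items by a single pass that toggles each element in a parity set and returns max of that set (or None if empty).
import Mathlib
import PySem

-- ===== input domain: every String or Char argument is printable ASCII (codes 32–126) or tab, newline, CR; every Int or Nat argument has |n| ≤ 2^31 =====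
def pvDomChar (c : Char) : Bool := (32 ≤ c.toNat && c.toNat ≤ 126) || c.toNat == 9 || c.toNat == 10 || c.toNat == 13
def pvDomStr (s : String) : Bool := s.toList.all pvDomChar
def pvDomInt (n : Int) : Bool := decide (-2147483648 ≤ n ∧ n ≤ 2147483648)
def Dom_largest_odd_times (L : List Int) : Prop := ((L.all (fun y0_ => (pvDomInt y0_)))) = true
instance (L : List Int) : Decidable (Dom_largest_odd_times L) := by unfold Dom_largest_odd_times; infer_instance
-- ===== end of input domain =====

-- B replaces the Counter dict + max-scan over its items by a one-pass parity set (toggle membership, then max); objective: simpler.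


-- ===== PORT A =====
def largest_odd_times (L : List Int) : Option Int :=
  -- elements_frequency = dict(Counter(L));
  -- for k, v in elements_frequency.items(): if v % 2 != 0: if maximum is None or k > maximum: maximum = k
  (PySem.Dict.counter L).items.foldl
    (fun maximum kv =>
      if PySem.Int.mod kv.2 2 ≠ 0 then
        match maximum with
        | none => some kv.1
        | some m => if kv.1 > m then some kv.1 else maximum
      else maximum)
    none

-- ===== PORT B =====
def largest_odd_times_alt (L : List Int) : Option Int :=
  -- parity set: toggle x on each occurrence (odd.remove on a checked member = Set.discard, exact there)
  let odd : PySem.Set Int :=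
    L.foldl (fun s x => if PySem.Set.contains s x then PySem.Set.discard s x else PySem.Set.add s x)
      PySem.Set.empty
  -- max(odd) if odd else None  (max of a set without a key: order-independent)
  if odd.isEmpty then none else PySem.List.max? odd (fun y => y)

-- ===== PRECONDITION & SPEC =====
def Spec_largest_odd_times (L : List Int) (out : Option Int) : Prop := out = largest_odd_times_alt L
instance (L : List Int) (out : Option Int) : Decidable (Spec_largest_odd_times L out) := by unfold Spec_largest_odd_times; infer_instance

-- ===== CLAIM (what is proved, stated in full; the proofs are below) =====
def Claim_equal_largest_odd_times : Prop := ∀ (L : List Int), Dom_largest_odd_times L → Spec_largest_odd_times L (largest_odd_times L)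

-- ===== LEMMAS AND PROOFS =====

-- the running-max step of A, once the pair (k, count) has been reduced to its key
def pvOmax (m : Option Int) (k : Int) : Option Int :=
  match m with
  | none => some k
  | some mm => if k > mm then some k else some mm

lemma pvOmax_some (t : List Int) : ∀ a : Int, t.foldl pvOmax (some a) = some (t.foldl max a) := by
  induction t with
  | nil => intro a; rfl
  | cons x t ih =>
    intro a
    simp only [List.foldl_cons, pvOmax]
    by_cases h : x > a
    · simp [h, max_eq_right (le_of_lt h), ih]
    · have hmax : max a x = a := max_eq_left (by omega)
      simp [h, hmax, ih]

lemma pvOmax_none_eq_max? (ks : List Int) :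
    ks.foldl pvOmax none = PySem.List.max? ks (fun y => y) := by
  cases ks with
  | nil => rfl
  | cons k t => simp [pvOmax, pvOmax_some, PySem.List.max?_id_cons]

-- A's loop over (key, count) pairs is the pvOmax fold over the keys with odd count
lemma foldA (cnt : Int → Int) (ks : List Int) : ∀ acc : Option Int,
    (ks.map (fun k => (k, cnt k))).foldl
      (fun maximum kv =>
        if PySem.Int.mod kv.2 2 ≠ 0 then
          match maximum with
          | none => some kv.1
          | some m => if kv.1 > m then some kv.1 else maximum
        else maximum)
      acc
    = (ks.filter (fun k => decide (PySem.Int.mod (cnt k) 2 ≠ 0))).foldl pvOmax acc := by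
  induction ks with
  | nil => intro acc; rfl
  | cons k t ih =>
    intro acc
    by_cases hodd : PySem.Int.mod (cnt k) 2 ≠ 0
    · have hstep :
          (if PySem.Int.mod (cnt k) 2 ≠ 0 then
            match acc with
            | none => some k
            | some m => if k > m then some k else acc
          else acc) = pvOmax acc k := by
        rw [if_pos hodd]; cases acc <;> rfl
      simp only [List.map_cons, List.foldl_cons, List.filter_cons, decide_eq_true hodd, if_true]
      rw [ih, hstep]
    · simp only [List.map_cons, List.foldl_cons, List.filter_cons, decide_eq_false hodd,
        Bool.false_eq_true, if_false, if_neg hodd]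
      exact ih acc

-- A's value is max? of the distinct elements with odd count
lemma A_eq_max? (L : List Int) :
    largest_odd_times L =
      PySem.List.max? ((PySem.Set.ofList L).filter (fun k => L.count k % 2 == 1)) (fun y => y) := by
  unfold largest_odd_times
  rw [PySem.Dict.items_counter, foldA, pvOmax_none_eq_max?]
  congr 1
  apply List.filter_congr
  intro k _
  have hm : PySem.Int.mod ((L.count k : Nat) : Int) 2 = (((L.count k) % 2 : Nat) : Int) :=
    (by exact_mod_cast PySem.Int.mod_natCast (L.count k) 2)
  rcases Nat.mod_two_eq_zero_or_one (L.count k) with h | h <;> simp [h] <;> omega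

-- the parity-set fold holds x iff the count of x flips the initial membership
lemma toggle_mem (x : Int) (L : List Int) : ∀ s : List Int,
    (x ∈ L.foldl (fun s x => if PySem.Set.contains s x then PySem.Set.discard s x else PySem.Set.add s x) s
      ↔ ((x ∈ s ∧ L.count x % 2 = 0) ∨ (x ∉ s ∧ L.count x % 2 = 1))) := by
  induction L with
  | nil => intro s; simp
  | cons a t ih =>
    intro s
    simp only [List.foldl_cons]
    rw [ih]
    by_cases hmemstep : PySem.Set.contains s a = true
    · have hmem : a ∈ s := (PySem.Set.contains_iff s a).1 hmemstep
      simp only [hmemstep, if_pos]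
      rw [PySem.Set.mem_discard]
      by_cases hax : a = x
      · subst hax
        simp [hmem]
        omega
      · have hxa : ¬x = a := fun h => hax h.symm
        simp [hax, hxa]
    · have hmem : a ∉ s := fun h => hmemstep ((PySem.Set.contains_iff s a).2 h)
      simp only [hmemstep, if_neg, Bool.false_eq_true, not_false_iff]
      rw [PySem.Set.mem_add]
      by_cases hax : a = x
      · subst hax
        simp [hmem]
        omega
      · have hxa : ¬x = a := fun h => hax h.symm
        simp [hax, hxa]

-- max? without a key depends only on membership
lemma max?_ext (l1 l2 : List Int) (h : ∀ x, x ∈ l1 ↔ x ∈ l2) :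
    PySem.List.max? l1 (fun y => y) = PySem.List.max? l2 (fun y => y) := by
  cases h1 : PySem.List.max? l1 (fun y => y) with
  | none =>
    cases h2 : PySem.List.max? l2 (fun y => y) with
    | none => rfl
    | some m2 =>
      have hm2 := PySem.List.max?_mem h2
      have : l1 = [] := (PySem.List.max?_eq_none_iff _ _).1 h1
      exact absurd ((h m2).2 hm2) (by simp [this])
  | some m1 =>
    cases h2 : PySem.List.max? l2 (fun y => y) with
    | none =>
      have hm1 := PySem.List.max?_mem h1
      have : l2 = [] := (PySem.List.max?_eq_none_iff _ _).1 h2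
      exact absurd ((h m1).1 hm1) (by simp [this])
    | some m2 =>
      have hle1 : m1 ≤ m2 := PySem.List.max?_isMax h2 m1 ((h m1).1 (PySem.List.max?_mem h1))
      have hle2 : m2 ≤ m1 := PySem.List.max?_isMax h1 m2 ((h m2).2 (PySem.List.max?_mem h2))
      rw [le_antisymm hle1 hle2]

lemma B_eq_max? (L : List Int) :
    largest_odd_times_alt L =
      PySem.List.max?
        (L.foldl (fun s x => if PySem.Set.contains s x then PySem.Set.discard s x else PySem.Set.add s x)
          PySem.Set.empty) (fun y => y) := by
  unfold largest_odd_times_alt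
  set odd := L.foldl (fun s x => if PySem.Set.contains s x then PySem.Set.discard s x else PySem.Set.add s x)
    PySem.Set.empty with hodd
  by_cases h : odd.isEmpty
  · rw [if_pos h, List.isEmpty_iff.1 h]
    rfl
  · simp [h]

-- ===== VERDICT (by name: the statement is the Claim_ definition above) =====
theorem largest_odd_times_spec : Claim_equal_largest_odd_times := by
  intro L _
  show largest_odd_times L = largest_odd_times_alt L
  rw [A_eq_max?, B_eq_max?]
  apply max?_ext
  intro x
  rw [List.mem_filter, toggle_mem, PySem.Set.mem_ofList]
  constructor
  · rintro ⟨hmem, hc⟩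
    have hc' : List.count x L % 2 = 1 := by simpa using hc
    exact Or.inr ⟨by simp [PySem.Set.empty], hc'⟩
  · rintro (⟨hs, _⟩ | ⟨_, hc⟩)
    · exact absurd hs (by simp [PySem.Set.empty])
    · exact ⟨List.count_pos_iff.1 (by omega), by simp [hc]⟩
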